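-- pv_equiv track=rewrite | github.com/facundoroman0/itse-programacion-python | desafios/desafios-introduccion-programacion/desafio_36.py | cuadrado_perfecto
-- ===== SOURCE A (Python) =====
-- def cuadrado_perfecto(numero):
--     if numero <= 0:
--         raise ValueError("El número debe ser un entero positivo")
--
--     cuadrados_impares = []
--
--     for i in range(1, numero + 1):
--         cuadrado = i * i
--         if cuadrado > numero:
--             break
--         if cuadrado % 2 != 0:
--             cuadrados_impares.append(cuadrado)
--
--     return cuadrados_impares
-- ===== SOURCE B (Python) =====
-- def cuadrado_perfecto(numero):
--     if numero <= 0: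
--         raise ValueError("El número debe ser un entero positivo")
--     cuadrados_impares = []
--     i = 1
--     while i * i <= numero:
--         cuadrados_impares.append(i * i)
--         i += 2
--     return cuadrados_impares
-- ===== Notes on version B (the rewrite author's own statement) =====
-- stated objective: simpler
-- what changed: Instead of scanning every i in range(1, numero+1) and filtering squares by parity with a break, B walks only the odd i (step 2) in a while loop guarded by i*i <= numero, appending i*i directly, so the parity test and the overshoot-break scan disappear.
import Mathlib
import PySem

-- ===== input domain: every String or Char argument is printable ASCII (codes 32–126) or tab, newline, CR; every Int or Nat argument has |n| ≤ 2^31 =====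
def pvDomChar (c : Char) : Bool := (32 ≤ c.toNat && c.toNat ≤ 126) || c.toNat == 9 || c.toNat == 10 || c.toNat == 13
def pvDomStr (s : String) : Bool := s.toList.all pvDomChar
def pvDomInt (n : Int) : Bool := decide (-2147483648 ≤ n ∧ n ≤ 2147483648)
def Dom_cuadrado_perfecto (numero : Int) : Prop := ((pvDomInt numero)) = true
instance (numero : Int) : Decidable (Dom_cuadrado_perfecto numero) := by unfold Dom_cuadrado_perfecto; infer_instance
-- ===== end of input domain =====

-- B replaces A's scan over range(1, numero+1) (parity filter + overshoot break) by a
-- step-2 walk over the odd i with i*i <= numero; return values proved equal on Pre_.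

-- ===== PORT A =====
-- the for-loop with its break: structural recursion over the range list
def pvALoop (numero : Int) : List Int → List Int → List Int
  | [], acc => acc
  | i :: rest, acc =>
      let cuadrado := i * i
      if cuadrado > numero then acc
      else if PySem.Int.mod cuadrado 2 ≠ 0 then pvALoop numero rest (acc ++ [cuadrado])
      else pvALoop numero rest acc

def cuadrado_perfecto (numero : Int) : List Int :=
  pvALoop numero (PySem.List.pyRange 1 (numero + 1) 1) []

-- ===== PORT B =====
-- the while-loop: i walks 1, 3, 5, … while i*i ≤ numero
def pvBLoop (numero : Int) (i : Nat) : List Int :=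
  if h : (i : Int) * i ≤ numero then ((i : Int) * i) :: pvBLoop numero (i + 2) else []
termination_by (numero + 1).toNat - i
decreasing_by
  have h1 : (i : Int) ≤ (i : Int) * i := by nlinarith [Int.natCast_nonneg i]
  omega

def cuadrado_perfecto_alt (numero : Int) : List Int :=
  pvBLoop numero 1

-- ===== PRECONDITION & SPEC =====
-- Pre_ excludes numero ≤ 0, where A (and B) raise ValueError.
def Pre_cuadrado_perfecto (numero : Int) : Prop := 0 < numero
instance (numero : Int) : Decidable (Pre_cuadrado_perfecto numero) := by unfold Pre_cuadrado_perfecto; infer_instance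
def pvWitness_cuadrado_perfecto : Int := 10

def Spec_cuadrado_perfecto (numero : Int) (out : List Int) : Prop := out = cuadrado_perfecto_alt numero
instance (numero : Int) (out : List Int) : Decidable (Spec_cuadrado_perfecto numero out) := by unfold Spec_cuadrado_perfecto; infer_instance

-- ===== CLAIM (what is proved, stated in full; the proofs are below) =====
def Claim_equal_cuadrado_perfecto : Prop := ∀ (numero : Int), Dom_cuadrado_perfecto numero → Pre_cuadrado_perfecto numero → Spec_cuadrado_perfecto numero (cuadrado_perfecto numero)

-- ===== LEMMAS AND PROOFS =====

lemma pv_odd_sq_mod (i : Nat) (h : i % 2 = 1) : PySem.Int.mod ((i : Int) * i) 2 = 1 := by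
  rw [PySem.Int.mod_eq_emod_of_pos (by norm_num : (0 : Int) < 2)]
  obtain ⟨k, rfl⟩ := Nat.odd_iff.mpr h
  have : ((2 * k + 1 : Nat) : Int) * ((2 * k + 1 : Nat) : Int) = 2 * (2 * (k * k) + 2 * k) + 1 := by
    push_cast; ring
  rw [this]
  generalize (2 * ((k : Int) * k) + 2 * k) = m
  omega

lemma pv_even_sq_mod (i : Nat) (h : i % 2 = 0) : PySem.Int.mod ((i : Int) * i) 2 = 0 := by
  rw [PySem.Int.mod_eq_emod_of_pos (by norm_num : (0 : Int) < 2)]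
  obtain ⟨k, rfl⟩ := Nat.dvd_of_mod_eq_zero h
  have : ((2 * k : Nat) : Int) * ((2 * k : Nat) : Int) = 2 * (2 * (k * k)) := by
    push_cast; ring
  rw [this]
  generalize (2 * ((k : Int) * k)) = m
  omega

-- B's loop stops as soon as the square exceeds numero
lemma pv_bloop_nil (numero : Int) (i : Nat) (h : ¬ (i : Int) * i ≤ numero) :
    pvBLoop numero i = [] := by
  rw [pvBLoop, dif_neg h]

-- A's scan from an odd index i onwards equals acc ++ B's walk from i (fuel induction)
lemma pv_key (numero : Int) : ∀ (k i : Nat) (acc : List Int),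
    (numero + 1).toNat - i ≤ k → i % 2 = 1 →
    pvALoop numero (PySem.List.pyRange (i : Int) (numero + 1) 1) acc = acc ++ pvBLoop numero i := by
  intro k
  induction k with
  | zero =>
    intro i acc hk hodd
    have hi1 : 1 ≤ i := by omega
    have hle : ¬ (i : Int) * i ≤ numero := by
      intro hle
      have hii : (i : Int) ≤ (i : Int) * i := by nlinarith [Int.natCast_nonneg i]
      omega
    rw [pv_bloop_nil numero i hle]
    rw [PySem.List.pyRange_one_eq_nil (by omega)]
    simp [pvALoop]
  | succ k IH =>
    intro i acc hk hodd
    have hi1 : 1 ≤ i := by omega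
    by_cases hle : (i : Int) * i ≤ numero
    · -- loop continues: range starts with i, square is odd, append
      have hii : (i : Int) ≤ (i : Int) * i := by nlinarith [Int.natCast_nonneg i]
      have hlt : (i : Int) < numero + 1 := by omega
      rw [PySem.List.pyRange_one_cons hlt]
      rw [pvBLoop]
      simp only [hle, dite_true]
      simp only [pvALoop, not_lt.mpr hle, pv_odd_sq_mod i hodd,
        if_pos (by norm_num : (1 : Int) ≠ 0)]
      -- next index i+1 is even
      by_cases hnext : ((i : Int) + 1) < numero + 1
      · have hcast : ((i : Int) + 1) = ((i + 1 : Nat) : Int) := by push_cast; ring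
        rw [hcast, PySem.List.pyRange_one_cons (by rw [← hcast]; exact hnext)]
        by_cases hsq : ((i + 1 : Nat) : Int) * (i + 1 : Nat) > numero
        · -- break at i+1; B's loop also stops at i+2
          simp only [pvALoop, if_pos hsq]
          rw [pv_bloop_nil numero (i + 2) (by
            push_cast at hsq ⊢; nlinarith [Int.natCast_nonneg i])]
          simp
        · -- skip even i+1, recurse at i+2
          simp only [pvALoop, if_neg hsq, pv_even_sq_mod (i + 1) (by omega),
            if_neg (by norm_num : ¬ (0 : Int) ≠ 0)]
          have hcast2 : ((i + 1 : Nat) : Int) + 1 = ((i + 2 : Nat) : Int) := by push_cast; ring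
          rw [hcast2, IH (i + 2) _ (by omega) (by omega)]
          simp
      · -- range after i is empty; B's loop stops at i+2
        rw [PySem.List.pyRange_one_eq_nil (by omega : numero + 1 ≤ (i : Int) + 1)]
        rw [pv_bloop_nil numero (i + 2) (by
          push_cast; nlinarith [Int.natCast_nonneg i])]
        simp [pvALoop]
    · -- loop over: either range empty or first square overshoots
      rw [pv_bloop_nil numero i hle]
      by_cases hib : (i : Int) < numero + 1
      · rw [PySem.List.pyRange_one_cons hib]
        simp [pvALoop, lt_of_not_ge hle]
      · rw [PySem.List.pyRange_one_eq_nil (by omega)]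
        simp [pvALoop]

-- ===== VERDICT (by name: the statement is the Claim_ definition above) =====
theorem cuadrado_perfecto_spec : Claim_equal_cuadrado_perfecto := by
  intro numero _ _
  unfold Spec_cuadrado_perfecto cuadrado_perfecto cuadrado_perfecto_alt
  simpa using pv_key numero ((numero + 1).toNat) 1 [] (by omega) (by norm_num)
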